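-- pv_equiv track=rewrite | github.com/zkytony/relations-pomdp | relpomdp/home2d/domain/maps/build_map.py | _placeable
-- ===== SOURCE A (Python) =====
-- def _placeable(obj_tup, free_locations):
--     top_left, width, length = obj_tup
--     # Check if all locations within this box are free
--     for x in range(width):
--         for y in range(length):
--             loc = (top_left[0] + x,
--                    top_left[1] + y)
--             if loc not in free_locations:
--                 return False
--     return True
-- ===== SOURCE B (Python) =====
-- def _placeable(obj_tup, free_locations):
--     (tx, ty), width, length = obj_tup
--     if width <= 0 or length <= 0:
--         return True
--     inside = {p for p in free_locations
--               if tx <= p[0] < tx + width and ty <= p[1] < ty + length}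
--     return len(inside) == width * length
-- ===== Notes on version B (the rewrite author's own statement) =====
-- stated objective: alternative
-- what changed: Instead of scanning the box cell-by-cell against the free list, B makes a single pass over free_locations, keeps the distinct points lying inside the rectangle (range checks), and declares the box placeable iff their count equals width*length.
import Mathlib
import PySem

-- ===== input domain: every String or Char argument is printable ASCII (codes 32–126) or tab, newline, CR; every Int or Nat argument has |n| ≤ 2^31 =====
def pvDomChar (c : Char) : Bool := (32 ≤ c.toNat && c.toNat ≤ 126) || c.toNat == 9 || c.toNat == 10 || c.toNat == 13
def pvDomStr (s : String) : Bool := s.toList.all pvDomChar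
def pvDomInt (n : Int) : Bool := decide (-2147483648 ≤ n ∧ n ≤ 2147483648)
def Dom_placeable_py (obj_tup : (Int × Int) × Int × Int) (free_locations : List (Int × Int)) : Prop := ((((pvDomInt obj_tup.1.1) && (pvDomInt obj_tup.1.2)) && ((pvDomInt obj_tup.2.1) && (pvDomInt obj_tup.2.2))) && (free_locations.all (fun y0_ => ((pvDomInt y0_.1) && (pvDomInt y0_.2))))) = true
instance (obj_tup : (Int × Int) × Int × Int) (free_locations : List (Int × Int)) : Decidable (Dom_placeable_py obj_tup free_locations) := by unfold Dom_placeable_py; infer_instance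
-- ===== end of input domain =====

-- B makes one pass over free_locations, collecting the distinct ones inside the box,
-- and compares that count to width*length, instead of A's per-cell nested scan.

-- ===== PORT A =====
-- nested for-loops with early 'return False' = nested short-circuit conjunction
def placeable_py (obj_tup : (Int × Int) × Int × Int) (free_locations : List (Int × Int)) : Bool :=
  let top_left := obj_tup.1
  let width := obj_tup.2.1
  let length := obj_tup.2.2
  (PySem.List.pyRange 0 width 1).all (fun x =>
    (PySem.List.pyRange 0 length 1).all (fun y =>
      let loc := (top_left.1 + x, top_left.2 + y)
      free_locations.contains loc))

-- ===== PORT B =====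
def placeable_py_alt (obj_tup : (Int × Int) × Int × Int) (free_locations : List (Int × Int)) : Bool :=
  let tx := obj_tup.1.1
  let ty := obj_tup.1.2
  let width := obj_tup.2.1
  let length := obj_tup.2.2
  if width ≤ 0 || length ≤ 0 then true
  else
    let inside : PySem.Set (Int × Int) :=
      PySem.Set.ofList (free_locations.filter (fun p =>
        decide (tx ≤ p.1 ∧ p.1 < tx + width ∧ ty ≤ p.2 ∧ p.2 < ty + length)))
    decide (PySem.Set.len inside = width * length)

-- ===== PRECONDITION & SPEC =====
def Spec_placeable_py (obj_tup : (Int × Int) × Int × Int) (free_locations : List (Int × Int)) (out : Bool) : Prop := out = placeable_py_alt obj_tup free_locations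
instance (obj_tup : (Int × Int) × Int × Int) (free_locations : List (Int × Int)) (out : Bool) : Decidable (Spec_placeable_py obj_tup free_locations out) := by unfold Spec_placeable_py; infer_instance

-- ===== CLAIM (what is proved, stated in full; the proofs are below) =====
def Claim_equal_placeable_py : Prop := ∀ (obj_tup : (Int × Int) × Int × Int) (free_locations : List (Int × Int)), Dom_placeable_py obj_tup free_locations → Spec_placeable_py obj_tup free_locations (placeable_py obj_tup free_locations)

-- ===== LEMMAS AND PROOFS =====

-- the box as a Finset
noncomputable def pvBoxF (tx ty w l : Int) : Finset (Int × Int) :=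
  Finset.Ico tx (tx + w) ×ˢ Finset.Ico ty (ty + l)

theorem pvBoxF_mem (tx ty w l : Int) (p : Int × Int) :
    p ∈ pvBoxF tx ty w l ↔ tx ≤ p.1 ∧ p.1 < tx + w ∧ ty ≤ p.2 ∧ p.2 < ty + l := by
  simp [pvBoxF, Finset.mem_product, and_assoc]

theorem pvBoxF_card (tx ty w l : Int) :
    (pvBoxF tx ty w l).card = w.toNat * l.toNat := by
  simp [pvBoxF, Finset.card_product]

-- main bridge: A's nested scan equals B's count comparison, when the box is nonempty
theorem pvKey (tx ty w l : Int) (hw : 0 < w) (hl : 0 < l) (free : List (Int × Int)) :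
    ((PySem.List.pyRange 0 w 1).all (fun x =>
      (PySem.List.pyRange 0 l 1).all (fun y => free.contains (tx + x, ty + y))))
    = decide ((PySem.Set.len (PySem.Set.ofList (free.filter (fun p =>
        decide (tx ≤ p.1 ∧ p.1 < tx + w ∧ ty ≤ p.2 ∧ p.2 < ty + l))))) = w * l) := by
  set S : List (Int × Int) := PySem.Set.ofList (free.filter (fun p =>
        decide (tx ≤ p.1 ∧ p.1 < tx + w ∧ ty ≤ p.2 ∧ p.2 < ty + l))) with hS
  have hnod : S.Nodup := PySem.Set.nodup_ofList _
  have hmemS : ∀ p : Int × Int, p ∈ S ↔ p ∈ free ∧ p ∈ pvBoxF tx ty w l := by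
    intro p
    rw [hS, PySem.Set.mem_ofList, List.mem_filter, pvBoxF_mem]
    simp
  have hcardS : S.length = S.toFinset.card := (List.toFinset_card_of_nodup hnod).symm
  have hsub : S.toFinset ⊆ pvBoxF tx ty w l := by
    intro p hp
    exact ((hmemS p).1 (List.mem_toFinset.mp hp)).2
  rw [Bool.eq_iff_iff]
  simp only [List.all_eq_true, PySem.List.mem_pyRange_one, List.contains_eq_mem,
    decide_eq_true_eq, PySem.Set.len]
  constructor
  · -- all box cells free ⇒ S is exactly the box
    intro h
    have hfe : S.toFinset = pvBoxF tx ty w l := by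
      apply Finset.Subset.antisymm hsub
      intro p hp
      rw [List.mem_toFinset, hmemS]
      refine ⟨?_, hp⟩
      rw [pvBoxF_mem] at hp
      have := h (p.1 - tx) ⟨by omega, by omega⟩ (p.2 - ty) ⟨by omega, by omega⟩
      simpa [show tx + (p.1 - tx) = p.1 by ring, show ty + (p.2 - ty) = p.2 by ring] using this
    rw [hcardS, hfe, pvBoxF_card]
    push_cast [Int.toNat_of_nonneg hw.le, Int.toNat_of_nonneg hl.le]
    ring
  · -- counts match ⇒ the box is contained in S, hence in free
    intro h x hx y hy
    have hcard : (pvBoxF tx ty w l).card ≤ S.toFinset.card := by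
      rw [pvBoxF_card, ← hcardS]
      have : ((S.length : Int)) = (w.toNat : Int) * (l.toNat : Int) := by
        rw [h, Int.toNat_of_nonneg hw.le, Int.toNat_of_nonneg hl.le]
      omega
    have hfe : pvBoxF tx ty w l ⊆ S.toFinset := by
      rw [Finset.eq_of_subset_of_card_le hsub hcard]
    have hp : (tx + x, ty + y) ∈ S.toFinset := by
      apply hfe
      rw [pvBoxF_mem]
      exact ⟨by omega, by omega, by omega, by omega⟩
    exact ((hmemS _).1 (List.mem_toFinset.mp hp)).1

theorem placeable_eq (obj_tup : (Int × Int) × Int × Int) (free_locations : List (Int × Int)) :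
    placeable_py obj_tup free_locations = placeable_py_alt obj_tup free_locations := by
  obtain ⟨⟨tx, ty⟩, w, l⟩ := obj_tup
  unfold placeable_py placeable_py_alt
  by_cases hw : w ≤ 0
  · have h0 : PySem.List.pyRange 0 w 1 = [] := by
      rw [PySem.List.pyRange_one, show (w - 0).toNat = 0 by omega]; rfl
    simp [h0]; omega
  · by_cases hl : l ≤ 0
    · have h0 : PySem.List.pyRange 0 l 1 = [] := by
        rw [PySem.List.pyRange_one, show (l - 0).toNat = 0 by omega]; rfl
      simp [h0, decide_eq_true hl]
    · simp only [hw, hl, decide_false, Bool.or_self]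
      exact pvKey tx ty w l (by omega) (by omega) free_locations

-- ===== VERDICT (by name: the statement is the Claim_ definition above) =====
theorem placeable_py_spec : Claim_equal_placeable_py := by
  intro obj_tup free_locations _
  unfold Spec_placeable_py
  exact placeable_eq obj_tup free_locations
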